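-- pv_equiv track=rewrite | github.com/skvndyk/AdventOfCode | 2016/day2-2016.py | diamondCode
-- ===== SOURCE A (Python) =====
-- DIAMOND_GRID = [('*', '*', '1', '*', '*'),
--                 ('*', '2', '3', '4', '*'),
--                 ('5', '6', '7', '8', '9'),
--                 ('*', 'A', 'B', 'C', '*'),
--                 ('*', '*', 'D', '*', '*')]
--
-- DIRECTIONS = {
--     "U": [-1, 0],
--     "D": [1, 0],
--     "L": [0, -1],
--     "R": [0, 1]
-- }
--
-- def goBack(loc, direction):
--     return [x + y for x, y in zip([-x for x in direction], loc)]
--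
-- def diamondCode(lines):
--     boundary = len(DIAMOND_GRID)
--     loc = [2, 0]
--     code = ""
--
--     for line in lines:
--         for step in line:
--             direction = DIRECTIONS[step]
--             loc = [x + y for x, y in zip(direction, loc)]
--             while not(all(pt in range(0, boundary) for pt in loc)) or DIAMOND_GRID[loc[0]][loc[1]] == '*':
--                 loc = goBack(loc, direction)
--         num = str(DIAMOND_GRID[loc[0]][loc[1]])
--         code += num
--     return code
-- ===== SOURCE B (Python) =====
-- DIAMOND_GRID = [('*', '*', '1', '*', '*'),
--                 ('*', '2', '3', '4', '*'),
--                 ('5', '6', '7', '8', '9'),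
--                 ('*', 'A', 'B', 'C', '*'),
--                 ('*', '*', 'D', '*', '*')]
--
-- DELTAS = {"U": (-1, 0), "D": (1, 0), "L": (0, -1), "R": (0, 1)}
--
-- def _transitionTable():
--     n = len(DIAMOND_GRID)
--     table = {}
--     for r in range(n):
--         for c in range(n):
--             key = DIAMOND_GRID[r][c]
--             if key == '*':
--                 continue
--             moves = {}
--             for d, (dr, dc) in DELTAS.items():
--                 nr, nc = r + dr, c + dc
--                 if 0 <= nr < n and 0 <= nc < n and DIAMOND_GRID[nr][nc] != '*':
--                     moves[d] = DIAMOND_GRID[nr][nc]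
--                 else:
--                     moves[d] = key
--             table[key] = moves
--     return table
--
-- def diamondCode(lines):
--     table = _transitionTable()
--     key = '5'
--     out = []
--     for line in lines:
--         for step in line:
--             key = table[key][step]
--         out.append(key)
--     return "".join(out)
-- ===== Notes on version B (the rewrite author's own statement) =====
-- stated objective: idiomatic
-- what changed: B precomputes a transition table (key -> direction -> next key) from the grid once and drives the walk by dict lookups, replacing A's per-step coordinate arithmetic and back-up while-loop.
import Mathlib
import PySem

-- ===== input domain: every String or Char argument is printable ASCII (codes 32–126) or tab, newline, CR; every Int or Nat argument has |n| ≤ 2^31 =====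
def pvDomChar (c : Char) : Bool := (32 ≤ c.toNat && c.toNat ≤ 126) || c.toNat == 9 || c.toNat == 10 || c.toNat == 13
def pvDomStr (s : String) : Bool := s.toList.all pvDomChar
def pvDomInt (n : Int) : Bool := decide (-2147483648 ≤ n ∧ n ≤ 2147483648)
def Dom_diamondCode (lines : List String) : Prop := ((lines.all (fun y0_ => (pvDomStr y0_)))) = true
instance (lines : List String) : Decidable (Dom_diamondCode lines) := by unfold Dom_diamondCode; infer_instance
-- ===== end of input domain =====

-- B replaces A's per-step coordinate arithmetic and back-up while-loop by a transition
-- table (key → direction → key) built once from the grid; objective: idiomatic.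

-- ===== PORT A =====
-- DIAMOND_GRID (tuples of one-char strings ported as Char)
def pvGridA : List (List Char) :=
  [['*', '*', '1', '*', '*'],
   ['*', '2', '3', '4', '*'],
   ['5', '6', '7', '8', '9'],
   ['*', 'A', 'B', 'C', '*'],
   ['*', '*', 'D', '*', '*']]

-- DIRECTIONS (keys are the 1-char strings iterated from a line, hence Char)
def pvDirectionsA : PySem.Dict Char (Int × Int) :=
  PySem.Dict.ofList [('U', (-1, 0)), ('D', (1, 0)), ('L', (0, -1)), ('R', (0, 1))]

-- DIAMOND_GRID[loc[0]][loc[1]]; only evaluated with both indices in range, so the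
-- '*' default of getD is unreachable
def pvCellA (r c : Int) : Char :=
  ((PySem.List.pyGet? pvGridA r).bind (fun row => PySem.List.pyGet? row c)).getD '*'

-- the while-condition (short-circuit kept: the grid lookup only happens in range)
def pvBadA (loc : Int × Int) : Bool :=
  !(decide (0 ≤ loc.1) && decide (loc.1 < 5) && decide (0 ≤ loc.2) && decide (loc.2 < 5))
    || (pvCellA loc.1 loc.2 == '*')

-- goBack(loc, direction)
def pvGoBackA (loc dir : Int × Int) : Int × Int := (loc.1 - dir.1, loc.2 - dir.2)

-- the 'while … : loc = goBack(loc, direction)' loop; fuel only makes it total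
-- (one back-step from a location that was valid before the move always suffices)
def pvWhileBackA (fuel : Nat) (dir loc : Int × Int) : Int × Int :=
  match fuel with
  | 0 => loc
  | f + 1 => if pvBadA loc then pvWhileBackA f dir (pvGoBackA loc dir) else loc

-- body of 'for step in line'; DIRECTIONS[step] raises KeyError off 'UDLR' (excluded
-- by Pre_), so the (0,0) default of getD is unreachable
def pvStepA (loc : Int × Int) (step : Char) : Int × Int :=
  let dir := PySem.Dict.getD pvDirectionsA step (0, 0)
  pvWhileBackA 10 dir (dir.1 + loc.1, dir.2 + loc.2)

-- body of 'for line in lines' (state: loc and the accumulated code, as chars)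
def pvLineA (st : (Int × Int) × List Char) (line : String) : (Int × Int) × List Char :=
  let loc := line.toList.foldl pvStepA st.1
  (loc, st.2 ++ [pvCellA loc.1 loc.2])

def diamondCode (lines : List String) : String :=
  String.ofList (lines.foldl pvLineA ((2, 0), [])).2

-- ===== PORT B =====
def pvGridB : List (List Char) :=
  [['*', '*', '1', '*', '*'],
   ['*', '2', '3', '4', '*'],
   ['5', '6', '7', '8', '9'],
   ['*', 'A', 'B', 'C', '*'],
   ['*', '*', 'D', '*', '*']]

def pvDeltasB : List (Char × (Int × Int)) :=
  [('U', (-1, 0)), ('D', (1, 0)), ('L', (0, -1)), ('R', (0, 1))]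

-- DIAMOND_GRID[r][c], only used with indices in range
def pvCellB (r c : Int) : Char :=
  ((PySem.List.pyGet? pvGridB r).bind (fun row => PySem.List.pyGet? row c)).getD '*'

-- _transitionTable()
def pvTableB : PySem.Dict Char (PySem.Dict Char Char) :=
  (PySem.List.pyRange 0 5 1).foldl (fun table r =>
    (PySem.List.pyRange 0 5 1).foldl (fun table c =>
      let key := pvCellB r c
      if key = '*' then table
      else
        let moves := pvDeltasB.foldl (fun moves d =>
          let nr := r + d.2.1
          let nc := c + d.2.2
          if 0 ≤ nr ∧ nr < 5 ∧ 0 ≤ nc ∧ nc < 5 ∧ pvCellB nr nc ≠ '*' then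
            PySem.Dict.insert moves d.1 (pvCellB nr nc)
          else
            PySem.Dict.insert moves d.1 key) PySem.Dict.empty
        PySem.Dict.insert table key moves) table) PySem.Dict.empty

-- table[key][step]; both lookups raise KeyError only outside Pre_, so the
-- defaults are unreachable
def pvStepB (key step : Char) : Char :=
  (PySem.Dict.getD pvTableB key PySem.Dict.empty).getD step '*'

def pvLineB (st : Char × List String) (line : String) : Char × List String :=
  let key := line.toList.foldl pvStepB st.1
  (key, st.2 ++ [String.ofList [key]])

def diamondCode_alt (lines : List String) : String :=
  PySem.Str.join "" (lines.foldl pvLineB ('5', [])).2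

-- ===== PRECONDITION & SPEC =====
-- Pre_ excludes exactly the inputs on which A raises KeyError: any character of
-- any line that is not one of 'U','D','L','R'.
def Pre_diamondCode (lines : List String) : Prop :=
  (lines.all (fun l => l.toList.all (fun c => c ∈ (['U', 'D', 'L', 'R'] : List Char)))) = true
instance (lines : List String) : Decidable (Pre_diamondCode lines) := by
  unfold Pre_diamondCode; infer_instance

def pvWitness_diamondCode : List String := ["ULL", "RRDDD", "LURDL", "UUUUD"]

def Spec_diamondCode (lines : List String) (out : String) : Prop := out = diamondCode_alt lines
instance (lines : List String) (out : String) : Decidable (Spec_diamondCode lines out) := by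
  unfold Spec_diamondCode; infer_instance

-- ===== CLAIM (what is proved, stated in full; the proofs are below) =====
def Claim_equal_diamondCode : Prop :=
  ∀ (lines : List String), Dom_diamondCode lines → Pre_diamondCode lines →
    Spec_diamondCode lines (diamondCode lines)

-- ===== LEMMAS AND PROOFS =====
-- the 13 reachable (valid) locations of A
def pvValidLocs : List (Int × Int) :=
  [(0, 2), (1, 1), (1, 2), (1, 3), (2, 0), (2, 1), (2, 2), (2, 3), (2, 4),
   (3, 1), (3, 2), (3, 3), (4, 2)]

def pvTableLit : PySem.Dict Char (PySem.Dict Char Char) :=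
  PySem.Dict.ofList [('1', PySem.Dict.ofList [('U', '1'), ('D', '3'), ('L', '1'), ('R', '1')]),
   ('2', PySem.Dict.ofList [('U', '2'), ('D', '6'), ('L', '2'), ('R', '3')]),
   ('3', PySem.Dict.ofList [('U', '1'), ('D', '7'), ('L', '2'), ('R', '4')]),
   ('4', PySem.Dict.ofList [('U', '4'), ('D', '8'), ('L', '3'), ('R', '4')]),
   ('5', PySem.Dict.ofList [('U', '5'), ('D', '5'), ('L', '5'), ('R', '6')]),
   ('6', PySem.Dict.ofList [('U', '2'), ('D', 'A'), ('L', '5'), ('R', '7')]),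
   ('7', PySem.Dict.ofList [('U', '3'), ('D', 'B'), ('L', '6'), ('R', '8')]),
   ('8', PySem.Dict.ofList [('U', '4'), ('D', 'C'), ('L', '7'), ('R', '9')]),
   ('9', PySem.Dict.ofList [('U', '9'), ('D', '9'), ('L', '8'), ('R', '9')]),
   ('A', PySem.Dict.ofList [('U', '6'), ('D', 'A'), ('L', 'A'), ('R', 'B')]),
   ('B', PySem.Dict.ofList [('U', '7'), ('D', 'D'), ('L', 'A'), ('R', 'C')]),
   ('C', PySem.Dict.ofList [('U', '8'), ('D', 'C'), ('L', 'B'), ('R', 'C')]),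
   ('D', PySem.Dict.ofList [('U', 'B'), ('D', 'D'), ('L', 'D'), ('R', 'D')])]

-- B's table, evaluated once to a literal (keeps each kernel check below shallow)
lemma pvTableB_eq : pvTableB = pvTableLit := by
  set_option maxRecDepth 20000 in decide

lemma pvStepB_eq : pvStepB = fun key step =>
    (PySem.Dict.getD pvTableLit key PySem.Dict.empty).getD step '*' := by
  funext k s; simp only [pvStepB, pvTableB_eq]

-- one simulation step: from any valid location and any legal direction char, A's
-- step stays valid and B's table lookup returns the key of A's new cell
lemma pv_step_sim : ∀ loc ∈ pvValidLocs, ∀ c ∈ (['U', 'D', 'L', 'R'] : List Char),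
    pvStepA loc c ∈ pvValidLocs ∧
      pvStepB (pvCellA loc.1 loc.2) c = pvCellA (pvStepA loc c).1 (pvStepA loc c).2 := by
  rw [pvStepB_eq]
  intro loc hloc c hc
  fin_cases hloc <;> fin_cases hc <;> decide

lemma pv_line_sim (cs : List Char) (h : ∀ c ∈ cs, c ∈ (['U', 'D', 'L', 'R'] : List Char)) :
    ∀ loc ∈ pvValidLocs,
      cs.foldl pvStepA loc ∈ pvValidLocs ∧
        cs.foldl pvStepB (pvCellA loc.1 loc.2) =
          pvCellA (cs.foldl pvStepA loc).1 (cs.foldl pvStepA loc).2 := by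
  induction cs with
  | nil => intro loc hloc; exact ⟨hloc, rfl⟩
  | cons c cs ih =>
    intro loc hloc
    obtain ⟨h1, h2⟩ := pv_step_sim loc hloc c (h c (by simp))
    simpa [List.foldl_cons, h2] using ih (fun x hx => h x (by simp [hx])) _ h1

lemma pv_lines_sim (ls : List String)
    (h : ∀ l ∈ ls, ∀ c ∈ l.toList, c ∈ (['U', 'D', 'L', 'R'] : List Char)) :
    ∀ loc ∈ pvValidLocs, ∀ acc : List Char,
      (ls.foldl pvLineA (loc, acc)).1 ∈ pvValidLocs ∧
        ls.foldl pvLineB (pvCellA loc.1 loc.2, acc.map (fun c => String.ofList [c])) =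
          ((fun p => (pvCellA p.1.1 p.1.2, p.2.map (fun c => String.ofList [c])))
            (ls.foldl pvLineA (loc, acc))) := by
  induction ls with
  | nil => intro loc hloc acc; exact ⟨hloc, rfl⟩
  | cons l ls ih =>
    intro loc hloc acc
    obtain ⟨h1, h2⟩ := pv_line_sim l.toList (h l (by simp)) loc hloc
    have := ih (fun x hx => h x (by simp [hx])) (l.toList.foldl pvStepA loc) h1
      (acc ++ [pvCellA (l.toList.foldl pvStepA loc).1 (l.toList.foldl pvStepA loc).2])
    simpa [List.foldl_cons, pvLineA, pvLineB, h2] using this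

lemma pv_join_singletons (cs : List Char) :
    PySem.Str.join "" (cs.map (fun c => String.ofList [c])) = String.ofList cs := by
  apply String.toList_inj.mp
  rw [PySem.Str.toList_join]
  simp only [List.map_map]
  have : (String.toList ∘ fun c => String.ofList [c]) = fun c : Char => [c] := by
    funext c; simp
  simp [this, PySem.Chars.join_nil_singletons]

-- ===== VERDICT (by name: the statement is the Claim_ definition above) =====
theorem diamondCode_spec : Claim_equal_diamondCode := by
  intro lines _ hpre
  unfold Spec_diamondCode diamondCode diamondCode_alt
  have h : ∀ l ∈ lines, ∀ c ∈ l.toList, c ∈ (['U', 'D', 'L', 'R'] : List Char) := by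
    intro l hl c hc
    have := hpre
    unfold Pre_diamondCode at this
    simp [List.all_eq_true] at this
    simpa using (this l hl c hc)
  have hloc : ((2 : Int), (0 : Int)) ∈ pvValidLocs := by decide
  have := pv_lines_sim lines h (2, 0) hloc []
  rw [show pvCellA 2 0 = '5' from rfl] at this
  rw [show (([] : List Char).map (fun c => String.ofList [c])) = ([] : List String) from rfl] at this
  rw [this.2]
  exact (pv_join_singletons _).symm
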